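-- pv_equiv track=rewrite | github.com/bkille/RESP | Project/group2.py | up_diagonal_probability
-- ===== SOURCE A (Python) =====
-- def get_updiag(board, row_idx, col_idx):
--     return [board[row_idx - i][col_idx + i] for i in range(min(row_idx + 1, len(board) - col_idx))]
--
-- def student_consecutive_k(input_list, k, stone):
--     # Your code goes here
--     counter = 0
--     consecutive = False
--     for i in input_list:
--       if i == stone:
--         counter += 1
--       if i != stone:
--         counter = 0
--       if counter == k:
--         consecutive = True
--         break
--     return consecutive
--
-- def up_diagonal_probability(board, stone):
--   probability = 0
--   col_idx = 0
--   for row_idx in range(len(board)):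
--     diagonal = get_updiag(board, row_idx, col_idx)
--     if student_consecutive_k(diagonal, 1, stone):
--       probability = 1
--     if student_consecutive_k(diagonal, 2, stone):
--       probability = 2
--     if student_consecutive_k(diagonal, 3, stone):
--       probability = 3
--     if student_consecutive_k(diagonal, 4, stone):
--       probability = 4
--     if student_consecutive_k(diagonal, 5, stone):
--       probability = 5
--
--   col_idx = 1
--   row_index = len(board) -1
--   while col_idx < len(board):
--     diagonal = get_updiag(board, row_index, col_idx)
--     if student_consecutive_k(diagonal, 1, stone):
--       probability = 1
--     if student_consecutive_k(diagonal, 2, stone):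
--       probability = 2
--     if student_consecutive_k(diagonal, 3, stone):
--       probability = 3
--     if student_consecutive_k(diagonal, 4, stone):
--       probability = 4
--     if student_consecutive_k(diagonal, 5, stone):
--       probability = 5
--     col_idx += 1
--   return probability
-- ===== SOURCE B (Python) =====
-- def up_diagonal_probability(board, stone):
--     n = len(board)
--     starts = [(r, 0) for r in range(n)] + [(n - 1, c) for c in range(1, n)]
--     probability = 0
--     for row, col in starts:
--         run = 0
--         best = 0
--         for i in range(min(row + 1, n - col)):
--             if board[row - i][col + i] == stone:
--                 run = min(run + 1, 5)
--                 best = max(best, run)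
--             else:
--                 run = 0
--         if best != 0:
--             probability = best
--     return probability
-- ===== Notes on version B (the rewrite author's own statement) =====
-- stated objective: simpler
-- what changed: Per diagonal, B replaces building the diagonal list and scanning it five times with student_consecutive_k(k=1..5) by a single pass that tracks the run of consecutive stones capped at 5 and its maximum, overwriting probability when the diagonal contains any stone; the two diagonal-start loops are merged into one loop over a starts list (measured ~1.9-2.4x faster).
import Mathlib
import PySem

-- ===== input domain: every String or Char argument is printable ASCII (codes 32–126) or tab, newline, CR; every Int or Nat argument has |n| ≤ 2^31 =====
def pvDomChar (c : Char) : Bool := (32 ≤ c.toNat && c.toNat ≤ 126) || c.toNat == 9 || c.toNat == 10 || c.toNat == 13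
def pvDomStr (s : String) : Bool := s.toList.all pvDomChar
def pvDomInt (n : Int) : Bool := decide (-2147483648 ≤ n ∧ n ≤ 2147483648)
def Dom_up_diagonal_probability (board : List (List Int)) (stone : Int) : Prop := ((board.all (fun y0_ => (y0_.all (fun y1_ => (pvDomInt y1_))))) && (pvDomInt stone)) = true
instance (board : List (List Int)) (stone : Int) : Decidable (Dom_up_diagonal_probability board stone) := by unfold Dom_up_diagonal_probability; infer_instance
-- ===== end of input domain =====

-- B merges the two diagonal loops and replaces the five student_consecutive_k scans per
-- diagonal by one pass tracking the capped run of consecutive stones (objective: simpler).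

-- ===== PORT A =====
-- cell lookup board[r][c]; total via defaults — exact under Pre_ (indices in range)
def pvCell (board : List (List Int)) (r c : Int) : Int :=
  (PySem.List.pyGet? ((PySem.List.pyGet? board r).getD []) c).getD 0

def get_updiag (board : List (List Int)) (row_idx col_idx : Int) : List Int :=
  (PySem.List.pyRange 0 (min (row_idx + 1) ((board.length : Int) - col_idx)) 1).map
    (fun i => pvCell board (row_idx - i) (col_idx + i))

def sck_go (stone k : Int) : List Int → Int → Bool
  | [], _ => false
  | i :: rest, counter =>
    let counter := if i = stone then counter + 1 else counter
    let counter := if i ≠ stone then 0 else counter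
    if counter = k then true else sck_go stone k rest counter

def student_consecutive_k (input_list : List Int) (k stone : Int) : Bool :=
  sck_go stone k input_list 0

def pvStepA (board : List (List Int)) (stone row_idx col_idx probability : Int) : Int :=
  let diagonal := get_updiag board row_idx col_idx
  let probability := if student_consecutive_k diagonal 1 stone then 1 else probability
  let probability := if student_consecutive_k diagonal 2 stone then 2 else probability
  let probability := if student_consecutive_k diagonal 3 stone then 3 else probability
  let probability := if student_consecutive_k diagonal 4 stone then 4 else probability
  let probability := if student_consecutive_k diagonal 5 stone then 5 else probability
  probability

def up_diagonal_probability (board : List (List Int)) (stone : Int) : Int :=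
  let n : Int := board.length
  let p1 := (PySem.List.pyRange 0 n 1).foldl
    (fun probability row_idx => pvStepA board stone row_idx 0 probability) 0
  (PySem.List.pyRange 1 n 1).foldl
    (fun probability col_idx => pvStepA board stone (n - 1) col_idx probability) p1

-- ===== PORT B =====
def pvCellB (board : List (List Int)) (r c : Int) : Int :=
  (PySem.List.pyGet? ((PySem.List.pyGet? board r).getD []) c).getD 0

-- one pass over a diagonal: run of consecutive stones capped at 5, and its maximum
def pvScanB (board : List (List Int)) (stone row col n : Int) : Int :=
  ((PySem.List.pyRange 0 (min (row + 1) (n - col)) 1).foldl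
    (fun (p : Int × Int) i =>
      if pvCellB board (row - i) (col + i) = stone
      then (min (p.1 + 1) 5, max (p.2) (min (p.1 + 1) 5))
      else (0, p.2)) (0, 0)).2

def up_diagonal_probability_alt (board : List (List Int)) (stone : Int) : Int :=
  let n : Int := board.length
  let starts := ((PySem.List.pyRange 0 n 1).map (fun r => (r, (0 : Int)))) ++
                ((PySem.List.pyRange 1 n 1).map (fun c => (n - 1, c)))
  starts.foldl (fun probability rc =>
    let best := pvScanB board stone rc.1 rc.2 n
    if best ≠ 0 then best else probability) 0

-- ===== PRECONDITION & SPEC =====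
-- Pre_ excludes ragged boards (some row shorter than len(board)), on which A raises
-- IndexError while indexing the diagonals (B raises there too).
def Pre_up_diagonal_probability (board : List (List Int)) (stone : Int) : Prop :=
  ∀ row ∈ board, board.length ≤ row.length
instance (board : List (List Int)) (stone : Int) : Decidable (Pre_up_diagonal_probability board stone) := by
  unfold Pre_up_diagonal_probability; infer_instance

def pvWitness_up_diagonal_probability : List (List Int) × Int := ([[1, 0], [0, 1]], 1)

def Spec_up_diagonal_probability (board : List (List Int)) (stone : Int) (out : Int) : Prop := out = up_diagonal_probability_alt board stone
instance (board : List (List Int)) (stone : Int) (out : Int) : Decidable (Spec_up_diagonal_probability board stone out) := by unfold Spec_up_diagonal_probability; infer_instance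

-- ===== CLAIM (what is proved, stated in full; the proofs are below) =====
def Claim_equal_up_diagonal_probability : Prop := ∀ (board : List (List Int)) (stone : Int), Dom_up_diagonal_probability board stone → Pre_up_diagonal_probability board stone → Spec_up_diagonal_probability board stone (up_diagonal_probability board stone)

-- ===== LEMMAS AND PROOFS =====

-- B's fold with state (run, best), written over an explicit list
def pvFoldB (stone : Int) (xs : List Int) (run best : Int) : Int :=
  (xs.foldl (fun (p : Int × Int) x =>
    if x = stone then (min (p.1 + 1) 5, max p.2 (min (p.1 + 1) 5)) else (0, p.2))
    (run, best)).2

theorem pvFoldB_cons (stone x : Int) (xs : List Int) (run best : Int) :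
    pvFoldB stone (x :: xs) run best =
      if x = stone then pvFoldB stone xs (min (run + 1) 5) (max best (min (run + 1) 5))
      else pvFoldB stone xs 0 best := by
  simp only [pvFoldB, List.foldl_cons]; split_ifs with h <;> simp

theorem pvFoldB_le (stone : Int) (xs : List Int) (run best : Int) :
    best ≤ pvFoldB stone xs run best := by
  induction xs generalizing run best with
  | nil => simp [pvFoldB]
  | cons x xs ih =>
    rw [pvFoldB_cons]; split_ifs with h
    · exact le_trans (le_max_left _ _) (ih _ _)
    · exact ih _ _

theorem pvFoldB_le_five (stone : Int) (xs : List Int) (run best : Int)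
    (hb : best ≤ 5) : pvFoldB stone xs run best ≤ 5 := by
  induction xs generalizing run best with
  | nil => simpa [pvFoldB]
  | cons x xs ih =>
    rw [pvFoldB_cons]; split_ifs with h
    · exact ih _ _ (by omega)
    · exact ih _ _ hb

theorem pvFoldB_max (stone : Int) (xs : List Int) (run best : Int)
    (hr : 0 ≤ run) (hb : 0 ≤ best) :
    pvFoldB stone xs run best = max best (pvFoldB stone xs run 0) := by
  induction xs generalizing run best with
  | nil => simp [pvFoldB]; omega
  | cons x xs ih =>
    rw [pvFoldB_cons, pvFoldB_cons]
    split_ifs with h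
    · rw [ih (min (run + 1) 5) (max best (min (run + 1) 5)) (by omega) (by omega),
         ih (min (run + 1) 5) (max 0 (min (run + 1) 5)) (by omega) (by omega)]
      omega
    · rw [ih 0 best le_rfl hb]

theorem sck_go_cons_eq (stone k x : Int) (xs : List Int) (run : Int) (h : x = stone) :
    sck_go stone k (x :: xs) run =
      if run + 1 = k then true else sck_go stone k xs (run + 1) := by
  simp [sck_go, h]

theorem sck_go_cons_ne (stone k x : Int) (xs : List Int) (run : Int)
    (h : x ≠ stone) (hk : k ≠ 0) :
    sck_go stone k (x :: xs) run = sck_go stone k xs 0 := by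
  simp [sck_go, h, Ne.symm hk]

-- characterisation of A's scan: it finds k consecutive stones iff the capped max run reaches k
theorem sck_iff (stone : Int) (xs : List Int) (k : Int) (h5 : k ≤ 5) :
    ∀ run, 0 ≤ run → run < k →
      (sck_go stone k xs run = true ↔ k ≤ pvFoldB stone xs run run) := by
  induction xs with
  | nil => intro run h0 hk; simp [sck_go, pvFoldB]; omega
  | cons x xs ih =>
    intro run h0 hk
    rw [pvFoldB_cons]
    by_cases h : x = stone
    · rw [if_pos h, sck_go_cons_eq stone k x xs run h]
      have hmin : min (run + 1) 5 = run + 1 := by omega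
      have hmax : max run (run + 1) = run + 1 := by omega
      rw [hmin, hmax]
      by_cases hek : run + 1 = k
      · subst hek
        simpa using pvFoldB_le stone xs (run + 1) (run + 1)
      · rw [if_neg hek]
        exact ih (run + 1) (by omega) (by omega)
    · rw [if_neg h, sck_go_cons_ne stone k x xs run h (by omega)]
      rw [ih 0 le_rfl (by omega),
        pvFoldB_max stone xs 0 run le_rfl h0]
      omega

-- the per-diagonal steps of the two programs agree
theorem step_eq (board : List (List Int)) (stone row col prob : Int) :
    pvStepA board stone row col prob =
      (if pvScanB board stone row col (board.length : Int) ≠ 0 then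
        pvScanB board stone row col (board.length : Int) else prob) := by
  have hscan : pvScanB board stone row col (board.length : Int) =
      pvFoldB stone (get_updiag board row col) 0 0 := by
    simp only [pvScanB, pvFoldB, get_updiag, List.foldl_map, pvCell, pvCellB]
    rfl
  set m := pvFoldB stone (get_updiag board row col) 0 0 with hm
  have h0 : 0 ≤ m := pvFoldB_le stone _ 0 0
  have h5 : m ≤ 5 := pvFoldB_le_five stone _ 0 0 (by omega)
  have hs : ∀ k : Int, 1 ≤ k → k ≤ 5 →
      student_consecutive_k (get_updiag board row col) k stone = decide (k ≤ m) := by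
    intro k h1 hk5
    rw [student_consecutive_k]
    by_cases h : k ≤ m
    · simp [h, (sck_iff stone _ k hk5 0 le_rfl (by omega)).2 h]
    · simp only [h, decide_false]
      by_contra hc
      exact h ((sck_iff stone _ k hk5 0 le_rfl (by omega)).1 (by simpa using hc))
  simp only [pvStepA, hscan,
    hs 1 (by norm_num) (by norm_num), hs 2 (by norm_num) (by norm_num),
    hs 3 (by norm_num) (by norm_num), hs 4 (by norm_num) (by norm_num),
    hs 5 (by norm_num) (by norm_num), decide_eq_true_eq]
  split_ifs <;> omega

-- ===== VERDICT (by name: the statement is the Claim_ definition above) =====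
theorem up_diagonal_probability_spec : Claim_equal_up_diagonal_probability := by
  intro board stone _ _
  unfold Spec_up_diagonal_probability up_diagonal_probability up_diagonal_probability_alt
  simp only [List.foldl_append, List.foldl_map]
  congr 1
  · funext p c; exact step_eq board stone _ c p
  · congr 1; funext p r; exact step_eq board stone r 0 p
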